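-- pv_equiv track=rewrite | github.com/sutt/ppd | modules/SearchParams.py | combineGradients
-- ===== SOURCE A (Python) =====
-- from itertools import product
--
-- def combineDicts(*args):
--     d = {}
--     for elem in args:
--         for k in elem.keys():
--             d[k] = elem[k]
--     return d
--
-- def combineGradients(listGradients):
--
--     '''
--         input: list of Gradients (which are list of dicts)
--         output Gradient (list of dicts) which have all possible
--             combinations of indiv. gradients in input list combined.
--     '''
--
--     output = []
--
--     dims = [len(gradientG) for gradientG in listGradients]
--
--     xdims = [range(x) for x in dims]
--
--     for _p in product(*xdims):
--
--         gInd = [(i,v) for i,v in enumerate(_p)]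
--
--         dicts = [ listGradients[_ind[0]][_ind[1]] for _ind in gInd]
--
--         output.append( combineDicts(*dicts) )
--
--     return output
-- ===== SOURCE B (Python) =====
-- def combineGradients(listGradients):
--     '''
--         input: list of Gradients (which are list of dicts)
--         output Gradient (list of dicts) which have all possible
--             combinations of indiv. gradients in input list combined.
--     '''
--     result = [{}]
--     for g in listGradients:
--         result = [{**partial, **d} for partial in result for d in g]
--     return result
-- ===== Notes on version B (the rewrite author's own statement) =====
-- stated objective: simpler
-- what changed: Replaces itertools.product over index ranges plus enumerate/double-indexing and a per-combination combineDicts merge with an incremental left fold: result starts as [{}] and each gradient extends every partial combination by dict-unpacking merge.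
import Mathlib
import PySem

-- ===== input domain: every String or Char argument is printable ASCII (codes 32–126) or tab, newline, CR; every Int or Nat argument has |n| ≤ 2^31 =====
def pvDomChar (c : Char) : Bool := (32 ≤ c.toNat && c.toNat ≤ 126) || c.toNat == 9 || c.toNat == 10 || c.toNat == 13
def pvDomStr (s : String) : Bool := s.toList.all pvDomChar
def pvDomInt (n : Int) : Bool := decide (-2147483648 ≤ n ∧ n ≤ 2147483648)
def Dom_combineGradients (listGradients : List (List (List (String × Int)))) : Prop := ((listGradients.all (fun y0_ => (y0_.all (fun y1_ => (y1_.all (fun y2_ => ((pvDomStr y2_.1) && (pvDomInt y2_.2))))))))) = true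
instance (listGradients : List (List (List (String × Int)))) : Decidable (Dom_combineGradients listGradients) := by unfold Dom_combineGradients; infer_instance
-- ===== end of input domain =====

-- B replaces itertools.product + index tuples + per-combination combineDicts with an
-- incremental fold extending partial merges gradient by gradient (objective: simpler).

-- ===== PORT A =====
-- itertools.product(*pools): first pool varies slowest, exact enumeration order
def pvProduct (pools : List (List Int)) : List (List Int) :=
  pools.foldr (fun pool acc => pool.flatMap (fun x => acc.map (x :: ·))) [[]]

-- combineDicts(*args): d = {}; for elem in args: for k in elem.keys(): d[k] = elem[k]
-- (elem[k]: k comes from elem.keys(), so the default 0 of getD is never used)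
def combineDicts (args : List (List (String × Int))) : PySem.Dict String Int :=
  args.foldl (fun d elem =>
    (PySem.Dict.mk elem).keys.foldl
      (fun d k => d.insert k ((PySem.Dict.mk elem).getD k 0)) d)
    PySem.Dict.empty

-- indices produced by enumerate/product are always in range, so pyGetD's default [] is never used
def combineGradients (listGradients : List (List (List (String × Int)))) : List (List (String × Int)) :=
  let dims := listGradients.map (fun gradientG => (gradientG.length : Int))
  let xdims := dims.map (fun x => PySem.List.pyRange 0 x 1)
  (pvProduct xdims).foldl (fun output p =>
    let gInd := PySem.List.enumerate p 0
    let dicts := gInd.map (fun ind =>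
      PySem.List.pyGetD (PySem.List.pyGetD listGradients ind.1 []) ind.2 [])
    output ++ [(combineDicts dicts).items]) []

-- ===== PORT B =====
-- {**partial, **d}: a fresh dict from partial's items then d's items (later keys win)
def pvMergeB (pd0 d : List (String × Int)) : List (String × Int) :=
  (d.foldl (fun acc kv => acc.insert kv.1 kv.2)
    (pd0.foldl (fun acc kv => acc.insert kv.1 kv.2) PySem.Dict.empty)).items

def combineGradients_alt (listGradients : List (List (List (String × Int)))) : List (List (String × Int)) :=
  listGradients.foldl
    (fun result g => result.flatMap (fun pd => g.map (fun d => pvMergeB pd d)))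
    [[]]

-- ===== PRECONDITION & SPEC =====
-- Pre_ only requires every inner association list to have pairwise-distinct keys: every real
-- Python dict argument satisfies this (a Python dict cannot carry duplicate keys), so no input
-- the Python A accepts is excluded; it merely rules out Lean association lists that represent
-- no Python dict (on which A's first-match lookup and B's item re-insertion would disagree).
def Pre_combineGradients (listGradients : List (List (List (String × Int)))) : Prop :=
  ∀ g ∈ listGradients, ∀ e ∈ g, (e.map Prod.fst).Nodup
instance (listGradients : List (List (List (String × Int)))) : Decidable (Pre_combineGradients listGradients) := by unfold Pre_combineGradients; infer_instance
def pvWitness_combineGradients : (List (List (List (String × Int)))) :=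
  [[[("a", 1)], [("b", 2)]], [[("a", 7), ("c", 3)]]]

def Spec_combineGradients (listGradients : List (List (List (String × Int)))) (out : List (List (String × Int))) : Prop := out = combineGradients_alt listGradients
instance (listGradients : List (List (List (String × Int)))) (out : List (List (String × Int))) : Decidable (Spec_combineGradients listGradients out) := by unfold Spec_combineGradients; infer_instance

-- ===== CLAIM (what is proved, stated in full; the proofs are below) =====
def Claim_equal_combineGradients : Prop := ∀ (listGradients : List (List (List (String × Int)))), Dom_combineGradients listGradients → Pre_combineGradients listGradients → Spec_combineGradients listGradients (combineGradients listGradients)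

-- ===== LEMMAS AND PROOFS =====

-- the single-pair insert step both merges reduce to
def pvIns (d : PySem.Dict String Int) (kv : String × Int) : PySem.Dict String Int :=
  d.insert kv.1 kv.2

-- all ways of picking one dict from each gradient, product order
def pvSel : List (List (List (String × Int))) → List (List (List (String × Int)))
  | [] => [[]]
  | g :: gs => g.flatMap (fun d => (pvSel gs).map (d :: ·))

-- the common normal form both ports are reduced to
def pvNF (lg : List (List (List (String × Int)))) : List (List (String × Int)) :=
  (pvSel lg).map (fun ds =>
    (ds.foldl (fun q e => e.foldl pvIns q) PySem.Dict.empty).items)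

theorem pv_keyloop (l : List (String × Int)) (h : (l.map Prod.fst).Nodup) (d : PySem.Dict String Int) :
    (PySem.Dict.mk l).keys.foldl (fun d k => d.insert k ((PySem.Dict.mk l).getD k 0)) d
      = l.foldl pvIns d := by
  induction l generalizing d with
  | nil => simp [PySem.Dict.keys_mk]
  | cons kv rest ih =>
    obtain ⟨k0, v0⟩ := kv
    simp only [List.map_cons, List.nodup_cons] at h
    obtain ⟨hk0, hrest⟩ := h
    rw [PySem.Dict.keys_mk, List.map_cons, List.foldl_cons]
    have h1 : (PySem.Dict.mk ((k0, v0) :: rest)).getD k0 0 = v0 := by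
      rw [PySem.Dict.getD_eq_get?_getD, PySem.Dict.get?_mk_cons]; simp
    rw [h1]
    have h2 : (List.map Prod.fst rest).foldl
        (fun d k => d.insert k ((PySem.Dict.mk ((k0, v0) :: rest)).getD k 0)) (d.insert k0 v0)
        = (List.map Prod.fst rest).foldl
        (fun d k => d.insert k ((PySem.Dict.mk rest).getD k 0)) (d.insert k0 v0) := by
      apply PySem.List.foldl_congr_mem
      intro acc x hx
      have hne : k0 ≠ x := fun he => hk0 (he ▸ hx)
      rw [PySem.Dict.getD_eq_get?_getD, PySem.Dict.get?_mk_cons]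
      simp [hne, PySem.Dict.getD_eq_get?_getD]
    rw [h2, ← PySem.Dict.keys_mk (ν := Int) rest, ih hrest]
    rfl

theorem pv_combineDicts (ds : List (List (String × Int))) (h : ∀ e ∈ ds, (e.map Prod.fst).Nodup) :
    combineDicts ds = ds.foldl (fun q e => e.foldl pvIns q) PySem.Dict.empty := by
  unfold combineDicts
  apply PySem.List.foldl_congr_mem
  intro acc e he
  exact pv_keyloop e (h e he) acc

theorem pv_refold (q : PySem.Dict String Int) (h : q.keys.Nodup) :
    q.items.foldl (fun acc kv => acc.insert kv.1 kv.2) PySem.Dict.empty = q := by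
  apply PySem.Dict.ext
  have := PySem.Dict.items_foldl_insert_fresh (l := q.items) (k := Prod.fst) (v := Prod.snd)
      (d := PySem.Dict.empty) (by intro a _; simp [PySem.Dict.contains_empty]) (by simpa [PySem.Dict.keys] using h)
  simpa using this

theorem pv_mergeB (q : PySem.Dict String Int) (d : List (String × Int)) (h : q.keys.Nodup) :
    pvMergeB q.items d = (d.foldl pvIns q).items := by
  unfold pvMergeB
  rw [pv_refold q h]
  rfl

theorem pv_prod_length (pools : List (List Int)) (p : List Int) (hp : p ∈ pvProduct pools) :
    p.length = pools.length := by
  induction pools generalizing p with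
  | nil => simp [pvProduct] at hp; simp [hp]
  | cons pool rest ih =>
    simp only [pvProduct, List.foldr_cons, List.mem_flatMap, List.mem_map] at hp
    obtain ⟨x, hx, p', hp', rfl⟩ := hp
    simp [ih p' hp']

theorem pv_enum_zip (ctx : List (List (List (String × Int)))) (p : List Int) (s : Nat)
    (h : s + p.length ≤ ctx.length) :
    (PySem.List.enumerate p (s : Int)).map (fun ind =>
        PySem.List.pyGetD (PySem.List.pyGetD ctx ind.1 []) ind.2 [])
      = ((ctx.drop s).zip p).map (fun gv => PySem.List.pyGetD gv.1 gv.2 []) := by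
  induction p generalizing s with
  | nil => simp [PySem.List.enumerate]
  | cons x p' ih =>
    rw [PySem.List.enumerate_cons, List.map_cons]
    have hs : s < ctx.length := by simp at h; omega
    have hd : ctx.drop s = ctx[s] :: ctx.drop (s + 1) := List.drop_eq_getElem_cons hs
    have h1 : PySem.List.pyGetD ctx (s : Int) [] = ctx[s] := by
      rw [PySem.List.pyGetD_natCast]; exact List.getD_eq_getElem _ _ hs
    have h2 : ((s : Int) + 1) = ((s + 1 : Nat) : Int) := by push_cast; ring
    rw [hd, List.zip_cons_cons, List.map_cons, h1, h2, ih (s + 1) (by simp at h ⊢; omega)]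

theorem pv_prod_sel (lg : List (List (List (String × Int)))) :
    (pvProduct (lg.map (fun g => PySem.List.pyRange 0 (g.length : Int) 1))).map
        (fun p => (lg.zip p).map (fun gv => PySem.List.pyGetD gv.1 gv.2 []))
      = pvSel lg := by
  induction lg with
  | nil => simp [pvProduct, pvSel]
  | cons g gs ih =>
    simp only [pvSel, List.map_cons, pvProduct, List.foldr_cons]
    rw [List.map_flatMap]
    have step : ∀ x : Int,
        ((pvProduct (gs.map (fun g => PySem.List.pyRange 0 (g.length : Int) 1))).map (x :: ·)).map
          (fun p => ((g :: gs).zip p).map (fun gv => PySem.List.pyGetD gv.1 gv.2 []))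
        = (pvSel gs).map ((PySem.List.pyGetD g x []) :: ·) := by
      intro x
      rw [List.map_map, ← ih, List.map_map]
      rfl
    calc (PySem.List.pyRange 0 (g.length : Int) 1).flatMap
          (fun x => ((pvProduct (gs.map (fun g => PySem.List.pyRange 0 (g.length : Int) 1))).map (x :: ·)).map
            (fun p => ((g :: gs).zip p).map (fun gv => PySem.List.pyGetD gv.1 gv.2 [])))
        = (PySem.List.pyRange 0 (g.length : Int) 1).flatMap
            (fun x => (pvSel gs).map ((PySem.List.pyGetD g x []) :: ·)) := by
          simp only [step]
      _ = ((PySem.List.pyRange 0 (g.length : Int) 1).map (fun x => PySem.List.pyGetD g x [])).flatMap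
            (fun d => (pvSel gs).map (d :: ·)) := by rw [List.flatMap_map]
      _ = g.flatMap (fun d => (pvSel gs).map (d :: ·)) := by
          rw [PySem.List.map_pyGetD_pyRange_zero']

theorem pv_sel_mem (lg : List (List (List (String × Int)))) (ds : List (List (String × Int)))
    (hds : ds ∈ pvSel lg) : ∀ e ∈ ds, ∃ g ∈ lg, e ∈ g := by
  induction lg generalizing ds with
  | nil => simp [pvSel] at hds; simp [hds]
  | cons g gs ih =>
    simp only [pvSel, List.mem_flatMap, List.mem_map] at hds
    obtain ⟨d, hd, ds', hds', rfl⟩ := hds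
    intro e he
    rcases List.mem_cons.mp he with rfl | he'
    · exact ⟨g, List.mem_cons_self .., hd⟩
    · obtain ⟨g', hg', heg⟩ := ih ds' hds' e he'
      exact ⟨g', List.mem_cons_of_mem _ hg', heg⟩

theorem pv_A_nf (lg : List (List (List (String × Int)))) (hP : Pre_combineGradients lg) :
    combineGradients lg = pvNF lg := by
  unfold combineGradients
  simp only [List.map_map]
  rw [PySem.List.foldl_append_singleton_eq_map
    (f := fun p => (combineDicts ((PySem.List.enumerate p 0).map (fun ind =>
      PySem.List.pyGetD (PySem.List.pyGetD lg ind.1 []) ind.2 []))).items)]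
  rw [List.nil_append]
  have hpools : lg.map ((fun x => PySem.List.pyRange 0 x 1) ∘ fun g => (g.length : Int))
      = lg.map (fun g => PySem.List.pyRange 0 (g.length : Int) 1) := rfl
  rw [hpools]
  have h1 : (pvProduct (lg.map (fun g => PySem.List.pyRange 0 (g.length : Int) 1))).map
      (fun p => (combineDicts ((PySem.List.enumerate p 0).map (fun ind =>
        PySem.List.pyGetD (PySem.List.pyGetD lg ind.1 []) ind.2 []))).items)
      = (pvProduct (lg.map (fun g => PySem.List.pyRange 0 (g.length : Int) 1))).map
      (fun p => (combineDicts ((lg.zip p).map (fun gv => PySem.List.pyGetD gv.1 gv.2 []))).items) := by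
    apply List.map_congr_left
    intro p hp
    have hlen := pv_prod_length _ p hp
    simp only [List.length_map] at hlen
    have := pv_enum_zip lg p 0 (by omega)
    simp only [Nat.cast_zero, List.drop_zero] at this
    rw [this]
  rw [h1]
  have h2 : (pvProduct (lg.map (fun g => PySem.List.pyRange 0 (g.length : Int) 1))).map
      (fun p => (combineDicts ((lg.zip p).map (fun gv => PySem.List.pyGetD gv.1 gv.2 []))).items)
      = ((pvProduct (lg.map (fun g => PySem.List.pyRange 0 (g.length : Int) 1))).map
        (fun p => (lg.zip p).map (fun gv => PySem.List.pyGetD gv.1 gv.2 []))).map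
      (fun ds => (combineDicts ds).items) := by rw [List.map_map]; rfl
  rw [h2, pv_prod_sel]
  unfold pvNF
  apply List.map_congr_left
  intro ds hds
  rw [pv_combineDicts ds]
  intro e he
  obtain ⟨g, hg, heg⟩ := pv_sel_mem lg ds hds e he
  exact hP g hg e heg

theorem pv_B_loop (lg : List (List (List (String × Int))))
    (hP : ∀ g ∈ lg, ∀ e ∈ g, (e.map Prod.fst).Nodup) :
    ∀ (res : List (PySem.Dict String Int)), (∀ q ∈ res, q.keys.Nodup) →
    lg.foldl (fun result g => result.flatMap (fun pd => g.map (fun d => pvMergeB pd d)))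
        (res.map PySem.Dict.items)
      = res.flatMap (fun q => (pvSel lg).map (fun ds =>
          (ds.foldl (fun q e => e.foldl pvIns q) q).items)) := by
  induction lg with
  | nil =>
    intro res _
    rw [List.foldl_nil, ← List.flatMap_singleton' (res.map PySem.Dict.items), List.flatMap_map]
    simp only [pvSel, List.map_cons, List.map_nil, List.foldl_nil]
  | cons g gs ih =>
    intro res hres
    rw [List.foldl_cons]
    have hstep : (res.map PySem.Dict.items).flatMap (fun pd => g.map (fun d => pvMergeB pd d))
        = (res.flatMap (fun q => g.map (fun d => d.foldl pvIns q))).map PySem.Dict.items := by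
      rw [List.flatMap_map, List.map_flatMap]
      simp only [List.flatMap_def]
      apply congrArg
      apply List.map_congr_left
      intro q hq
      rw [List.map_map]
      apply List.map_congr_left
      intro d _
      exact pv_mergeB q d (hres q hq)
    rw [hstep]
    rw [ih (fun g' hg' => hP g' (List.mem_cons_of_mem _ hg'))
      (res.flatMap (fun q => g.map (fun d => d.foldl pvIns q)))
      (by
        intro q' hq'
        simp only [List.mem_flatMap, List.mem_map] at hq'
        obtain ⟨q, hq, d, _, rfl⟩ := hq'
        exact PySem.Dict.nodup_keys_foldl_insert_key d Prod.fst (fun _ x => x.2) q (hres q hq))]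
    rw [List.flatMap_assoc]
    simp only [pvSel, List.map_flatMap, List.flatMap_map, List.map_map]
    rfl

theorem pv_B_nf (lg : List (List (List (String × Int)))) (hP : Pre_combineGradients lg) :
    combineGradients_alt lg = pvNF lg := by
  have he : ([[]] : List (List (String × Int))) = [PySem.Dict.empty].map PySem.Dict.items := rfl
  unfold combineGradients_alt
  rw [he, pv_B_loop lg hP [PySem.Dict.empty] (by intro q hq; simp at hq; subst hq; simp [PySem.Dict.keys, PySem.Dict.empty])]
  simp [pvNF]

-- ===== VERDICT (by name: the statement is the Claim_ definition above) =====
theorem combineGradients_spec : Claim_equal_combineGradients := by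
  intro lg _ hP
  unfold Spec_combineGradients
  rw [pv_A_nf lg hP, pv_B_nf lg hP]
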